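-- pv_equiv track=rewrite | github.com/Erebus-Nyx/ai-companion | populate_all_motions.py | classify_motion_type
-- ===== SOURCE A (Python) =====
-- def classify_motion_type(group_name, motion_name=""):
--     """Classify motion type based on group and motion names"""
--     group_lower = group_name.lower()
--     motion_lower = motion_name.lower()
--
--     # Head/face motions
--     if any(keyword in group_lower for keyword in ['head', 'face', 'eye', 'blink', 'look']):
--         return 'head'
--
--     # Expression motions
--     if any(keyword in group_lower for keyword in ['expression', 'expr', 'emotion', 'mood']):
--         return 'expression'
--
--     # Special motions
--     if any(keyword in group_lower for keyword in ['special', 'unique', 'event', 'greeting']):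
--         return 'special'
--
--     # Check motion name too
--     if any(keyword in motion_lower for keyword in ['head', 'face', 'eye', 'blink', 'look']):
--         return 'head'
--     if any(keyword in motion_lower for keyword in ['expression', 'expr', 'emotion', 'mood']):
--         return 'expression'
--     if any(keyword in motion_lower for keyword in ['special', 'unique', 'event', 'greeting']):
--         return 'special'
--
--     # Default to body motion
--     return 'body'
-- ===== SOURCE B (Python) =====
-- def classify_motion_type(group_name, motion_name=""):
--     """Classify motion type based on group and motion names"""
--     priority = {
--         'head': 0, 'face': 0, 'eye': 0, 'blink': 0, 'look': 0,
--         'expression': 1, 'expr': 1, 'emotion': 1, 'mood': 1,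
--         'special': 2, 'unique': 2, 'event': 2, 'greeting': 2,
--     }
--     labels = ['head', 'expression', 'special', 'body']
--
--     def score(text):
--         t = text.lower()
--         return min((p for k, p in priority.items() if k in t), default=3)
--
--     s = score(group_name)
--     if s == 3:
--         s = score(motion_name)
--     return labels[s]
-- ===== Notes on version B (the rewrite author's own statement) =====
-- stated objective: alternative
-- what changed: Instead of six ordered short-circuiting branch tests, B maps every keyword to a numeric priority in one flat table, computes the minimum matching priority (argmin) per text with no early exit, and indexes a label list with the score.
import Mathlib
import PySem

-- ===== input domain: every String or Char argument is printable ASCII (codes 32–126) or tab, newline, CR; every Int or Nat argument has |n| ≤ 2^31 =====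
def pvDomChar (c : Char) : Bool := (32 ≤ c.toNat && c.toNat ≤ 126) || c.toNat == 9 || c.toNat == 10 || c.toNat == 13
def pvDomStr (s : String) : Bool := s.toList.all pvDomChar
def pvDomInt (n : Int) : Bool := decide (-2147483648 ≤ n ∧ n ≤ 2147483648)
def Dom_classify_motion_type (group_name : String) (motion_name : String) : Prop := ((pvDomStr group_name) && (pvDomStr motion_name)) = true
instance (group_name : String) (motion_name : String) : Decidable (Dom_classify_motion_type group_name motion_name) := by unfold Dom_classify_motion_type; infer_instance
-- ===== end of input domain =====

-- B replaces A's six ordered branch tests by a flat keyword→priority table, a min-fold score per text, and label indexing (alternative decomposition, same cost).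

-- ===== PORT A =====
def pvHeadKw : List String := ["head", "face", "eye", "blink", "look"]
def pvExprKw : List String := ["expression", "expr", "emotion", "mood"]
def pvSpecKw : List String := ["special", "unique", "event", "greeting"]

def classify_motion_type (group_name : String) (motion_name : String) : String :=
  let group_lower := PySem.Str.lower group_name
  let motion_lower := PySem.Str.lower motion_name
  if pvHeadKw.any (fun k => PySem.Str.isIn k group_lower) then "head"
  else if pvExprKw.any (fun k => PySem.Str.isIn k group_lower) then "expression"
  else if pvSpecKw.any (fun k => PySem.Str.isIn k group_lower) then "special"
  else if pvHeadKw.any (fun k => PySem.Str.isIn k motion_lower) then "head"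
  else if pvExprKw.any (fun k => PySem.Str.isIn k motion_lower) then "expression"
  else if pvSpecKw.any (fun k => PySem.Str.isIn k motion_lower) then "special"
  else "body"

-- ===== PORT B =====
-- the dict literal 'priority' (insertion order, all keys distinct)
def pvPrio : List (String × Nat) :=
  [("head", 0), ("face", 0), ("eye", 0), ("blink", 0), ("look", 0),
   ("expression", 1), ("expr", 1), ("emotion", 1), ("mood", 1),
   ("special", 2), ("unique", 2), ("event", 2), ("greeting", 2)]

def pvLabels : List String := ["head", "expression", "special", "body"]

-- min((p for k, p in priority.items() if k in t), default=3): ported as a min-fold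
-- over the items with initial accumulator 3 (exact: every priority is < 3, so the
-- fold is the min of the filtered priorities, and 3 exactly when none matches)
def pvScore (text : String) : Nat :=
  let t := PySem.Str.lower text
  pvPrio.foldl (fun acc kp => if PySem.Str.isIn kp.1 t then min acc kp.2 else acc) 3

def classify_motion_type_alt (group_name : String) (motion_name : String) : String :=
  let s := pvScore group_name
  let s := if s = 3 then pvScore motion_name else s
  -- labels[s]: s is always in 0..3, so plain in-range list indexing is exact
  pvLabels.getD s "body"

-- ===== PRECONDITION & SPEC =====
def Spec_classify_motion_type (group_name : String) (motion_name : String) (out : String) : Prop := out = classify_motion_type_alt group_name motion_name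
instance (group_name : String) (motion_name : String) (out : String) : Decidable (Spec_classify_motion_type group_name motion_name out) := by unfold Spec_classify_motion_type; infer_instance

-- ===== CLAIM (what is proved, stated in full; the proofs are below) =====
def Claim_equal_classify_motion_type : Prop := ∀ (group_name : String) (motion_name : String), Dom_classify_motion_type group_name motion_name → Spec_classify_motion_type group_name motion_name (classify_motion_type group_name motion_name)

-- ===== LEMMAS AND PROOFS =====

-- a min-fold over a segment of items sharing one priority p is: min acc p if any keyword hits, else acc
theorem pv_foldl_min_seg (t : String) (p : Nat) (ks : List String) (acc : Nat) :
    (ks.map (fun k => (k, p))).foldl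
        (fun acc kp => if PySem.Str.isIn kp.1 t then min acc kp.2 else acc) acc
      = if ks.any (fun k => PySem.Str.isIn k t) then min acc p else acc := by
  induction ks generalizing acc with
  | nil => simp
  | cons k ks ih =>
    simp only [List.map_cons, List.foldl_cons, List.any_cons]
    simp only [PySem.Str.isIn] at ih
    simp only [List.any_eq_true] at ih
    by_cases h : PySem.Chars.isIn k.toList t.toList = true
    · simp [PySem.Str.isIn, h]
      rw [ih]
      split_ifs <;> omega
    · simp [PySem.Str.isIn, h]
      rw [ih]

theorem pv_score_eq (s : String) :
    pvScore s =
      (if pvHeadKw.any (fun k => PySem.Str.isIn k (PySem.Str.lower s)) then 0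
       else if pvExprKw.any (fun k => PySem.Str.isIn k (PySem.Str.lower s)) then 1
       else if pvSpecKw.any (fun k => PySem.Str.isIn k (PySem.Str.lower s)) then 2
       else 3) := by
  have hsplit : pvPrio = pvHeadKw.map (fun k => (k, 0))
      ++ pvExprKw.map (fun k => (k, 1)) ++ pvSpecKw.map (fun k => (k, 2)) := by rfl
  simp only [pvScore, hsplit, List.foldl_append, pv_foldl_min_seg]
  split_ifs <;> rfl

-- ===== VERDICT (by name: the statement is the Claim_ definition above) =====
theorem classify_motion_type_spec : Claim_equal_classify_motion_type := by
  intro g m _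
  simp only [Spec_classify_motion_type, classify_motion_type, classify_motion_type_alt,
    pv_score_eq]
  split_ifs <;> simp_all [pvLabels]
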